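-- pv_equiv track=rewrite | github.com/houtadono/picoCTF_cryptography | _mini_modules.py | decryptRot
-- ===== SOURCE A (Python) =====
-- def decryptRot(cipher,rot):
--     result = []
--     for i in range(len(cipher)):
--         c = ord(cipher[i])
--         if(c>=65 and c<=90):
--             c-=rot
--             if c<65: c+=26
--         if(c>=97 and c<=122):
--             c-=rot
--             if c<97: c+=26
--         result.append(chr(c))
--     return "".join(result)
-- ===== SOURCE B (Python) =====
-- def decryptRot(cipher, rot):
--     table = {}
--     for c in list(range(65, 91)) + list(range(97, 123)):
--         x = c
--         if x >= 65 and x <= 90: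
--             x -= rot
--             if x < 65: x += 26
--         if x >= 97 and x <= 122:
--             x -= rot
--             if x < 97: x += 26
--         table[c] = x
--     return cipher.translate(table)
-- ===== Notes on version B (the rewrite author's own statement) =====
-- stated objective: idiomatic
-- what changed: B builds a 52-entry translation table once (applying A's two sequential if-blocks to each letter ordinal 65-90 and 97-122) and then delegates the whole per-character pass to str.translate, instead of A's explicit per-character arithmetic loop with a result list and join.
-- outside the precondition, e.g. on decryptRot('A', 200): A raises ValueError, B raises ValueError
import Mathlib
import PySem

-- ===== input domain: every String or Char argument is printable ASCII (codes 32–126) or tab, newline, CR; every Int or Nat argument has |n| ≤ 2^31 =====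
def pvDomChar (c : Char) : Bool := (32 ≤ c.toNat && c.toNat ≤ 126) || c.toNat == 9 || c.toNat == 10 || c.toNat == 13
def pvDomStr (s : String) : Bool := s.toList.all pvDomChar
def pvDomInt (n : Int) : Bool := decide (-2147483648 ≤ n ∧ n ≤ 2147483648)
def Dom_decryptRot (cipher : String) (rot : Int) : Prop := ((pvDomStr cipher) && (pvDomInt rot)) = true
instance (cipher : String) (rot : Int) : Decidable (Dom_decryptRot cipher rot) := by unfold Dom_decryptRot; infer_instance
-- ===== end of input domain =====

-- B builds the 52-entry letter translation table once (with A's per-ordinal arithmetic) and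
-- delegates the per-character pass to str.translate; equal return values on Pre_.

-- ===== PORT A =====
def decryptRot (cipher : String) (rot : Int) : String :=
  String.ofList (cipher.toList.map (fun ch =>
    let c0 : Int := ch.toNat
    let c1 : Int := if 65 ≤ c0 ∧ c0 ≤ 90 then
        (if c0 - rot < 65 then c0 - rot + 26 else c0 - rot) else c0
    let c2 : Int := if 97 ≤ c1 ∧ c1 ≤ 122 then
        (if c1 - rot < 97 then c1 - rot + 26 else c1 - rot) else c1
    Char.ofNat c2.toNat))

-- ===== PORT B =====
def decryptRot_alt (cipher : String) (rot : Int) : String :=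
  let table : PySem.Dict Int Int :=
    (PySem.List.pyRange 65 91 1 ++ PySem.List.pyRange 97 123 1).foldl
      (fun d c =>
        let x1 : Int := if 65 ≤ c ∧ c ≤ 90 then
            (if c - rot < 65 then c - rot + 26 else c - rot) else c
        let x2 : Int := if 97 ≤ x1 ∧ x1 ≤ 122 then
            (if x1 - rot < 97 then x1 - rot + 26 else x1 - rot) else x1
        d.insert c x2)
      PySem.Dict.empty
  String.ofList (cipher.toList.map (fun ch =>
    match table.get? (ch.toNat : Int) with
    | some v => Char.ofNat v.toNat
    | none => ch))

-- ===== PRECONDITION & SPEC =====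
-- Pre_ excludes inputs where Python's chr raises ValueError (a letter's shifted code falls
-- outside 0..0x10FFFF) and — a stated narrowing — letters whose shifted code lands in the
-- surrogate range 0xD800..0xDFFF: there Python A returns a lone-surrogate str that a Lean
-- String/Char cannot represent (B's Python returns the identical surrogate string).
def Pre_decryptRot (cipher : String) (rot : Int) : Prop :=
  cipher.toList.all (fun ch =>
    !((65 ≤ ch.toNat && ch.toNat ≤ 90) || (97 ≤ ch.toNat && ch.toNat ≤ 122)) ||
    (decide (rot ≤ (ch.toNat : Int) + 26) && decide ((ch.toNat : Int) - 1114111 ≤ rot) &&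
     !(decide (55296 ≤ (ch.toNat : Int) - rot) && decide ((ch.toNat : Int) - rot ≤ 57343)))) = true
instance (cipher : String) (rot : Int) : Decidable (Pre_decryptRot cipher rot) := by
  unfold Pre_decryptRot; infer_instance

def pvWitness_decryptRot : String × Int := ("Kh!", 3)

def Spec_decryptRot (cipher : String) (rot : Int) (out : String) : Prop := out = decryptRot_alt cipher rot
instance (cipher : String) (rot : Int) (out : String) : Decidable (Spec_decryptRot cipher rot out) := by unfold Spec_decryptRot; infer_instance

-- ===== CLAIM (what is proved, stated in full; the proofs are below) =====
def Claim_equal_decryptRot : Prop := ∀ (cipher : String) (rot : Int), Dom_decryptRot cipher rot → Pre_decryptRot cipher rot → Spec_decryptRot cipher rot (decryptRot cipher rot)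

-- ===== LEMMAS AND PROOFS =====

-- the shared per-ordinal transform (A's two if-blocks), used only by the proofs
def pvStep (rot c : Int) : Int :=
  let x1 : Int := if 65 ≤ c ∧ c ≤ 90 then
      (if c - rot < 65 then c - rot + 26 else c - rot) else c
  if 97 ≤ x1 ∧ x1 ≤ 122 then
      (if x1 - rot < 97 then x1 - rot + 26 else x1 - rot) else x1

theorem pv_get?_foldl_insert (f : Int → Int) (l : List Int) (d : PySem.Dict Int Int) (c : Int) :
    (l.foldl (fun d a => d.insert a (f a)) d).get? c
      = if c ∈ l then some (f c) else d.get? c := by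
  induction l generalizing d with
  | nil => simp
  | cons a l ih =>
    simp only [List.foldl_cons, ih, List.mem_cons]
    by_cases hc : c ∈ l
    · simp [hc]
    · by_cases hca : c = a
      · subst hca; simp [hc, PySem.Dict.get?_insert_self]
      · simp [hc, hca, PySem.Dict.get?_insert_of_ne _ _ hca]

set_option maxRecDepth 4000 in
theorem pv_table_get (rot c : Int) :
    ((PySem.List.pyRange 65 91 1 ++ PySem.List.pyRange 97 123 1).foldl
        (fun d a => d.insert a (pvStep rot a)) PySem.Dict.empty).get? c
      = if (65 ≤ c ∧ c ≤ 90) ∨ (97 ≤ c ∧ c ≤ 122) then some (pvStep rot c) else none := by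
  rw [pv_get?_foldl_insert]
  simp only [List.mem_append, PySem.List.mem_pyRange_one, PySem.Dict.get?_empty]
  congr 1
  simp only [eq_iff_iff]
  omega

-- ===== VERDICT (by name: the statement is the Claim_ definition above) =====
theorem decryptRot_spec : Claim_equal_decryptRot := by
  intro cipher rot _ _
  show decryptRot cipher rot = decryptRot_alt cipher rot
  unfold decryptRot decryptRot_alt
  simp only []
  apply congrArg String.ofList
  apply List.map_congr_left
  intro ch _
  have htab := pv_table_get rot ((ch.toNat : Int))
  simp only [pvStep] at htab
  by_cases h : (65 ≤ (ch.toNat : Int) ∧ (ch.toNat : Int) ≤ 90) ∨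
      (97 ≤ (ch.toNat : Int) ∧ (ch.toNat : Int) ≤ 122)
  · rw [if_pos h] at htab
    rw [htab]
  · rw [if_neg h] at htab
    rw [htab]
    have h1 : ¬ (65 ≤ (ch.toNat : Int) ∧ (ch.toNat : Int) ≤ 90) := fun hx => h (Or.inl hx)
    have h2 : ¬ (97 ≤ (ch.toNat : Int) ∧ (ch.toNat : Int) ≤ 122) := fun hx => h (Or.inr hx)
    simp only [if_neg h1, if_neg h2, Int.toNat_natCast, Char.ofNat_toNat]
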